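-- pv_equiv track=rewrite | github.com/PLCoster/adventofcode2019 | day4.py | valid_passwords_2
-- ===== SOURCE A (Python) =====
-- def valid_passwords_2(passwords):
--     """
--     Takes a list of password strings, and returns the number of passwords in
--     the list meeting the following criteria:
--
--         - Passwords are six digit numbers
--         - In each password two adjacent digits must be the same
--         - The two adjacent digits meeting the above requirement must not be
--           part of a larger repeated block ie. 123455 is valid, 123444 is not.
--         - In each password, going from largest to smallest digit, the size of
--         the digit does not decrease:
--             111123, 135679, 111111 meet the criteria
--             223450 does not (decreasing pair of digits 50)
--             123789 does not (no double adjacent digits)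
--     """
--
--     valid = 0
--
--     for entry in passwords:
--         adjacent = False
--         order = True
--
--         #Check for adjacent duplicate numbers
--         for i in range(len(entry) - 1):
--
--             if (entry[i] == entry[i+1]):
--                 test_num = entry[i]
--
--                 if entry.count(test_num) == 2:
--                     adjacent = True
--
--         for i in range(len(entry) - 1):
--
--             if entry[i] > entry[i+1]:
--                 order = False
--
--         if adjacent and order:
--             valid += 1
--
--     return valid
-- ===== SOURCE B (Python) =====
-- def valid_passwords_2(passwords):
--     """Single-pass run-length scan: walk each entry once, maintaining the
--     length of the current run of equal characters and a sortedness flag;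
--     a run closing at exactly length 2 (or the final run being length 2)
--     sets the double flag."""
--     valid = 0
--     for entry in passwords:
--         prev = None
--         run = 1
--         has_double = False
--         sorted_ok = True
--         for ch in entry:
--             if prev is None:
--                 prev = ch
--                 continue
--             if ch == prev:
--                 run += 1
--             else:
--                 if ch < prev:
--                     sorted_ok = False
--                 if run == 2:
--                     has_double = True
--                 run = 1
--             prev = ch
--         if run == 2:
--             has_double = True
--         if sorted_ok and has_double:
--             valid += 1
--     return valid
-- ===== Notes on version B (the rewrite author's own statement) =====
-- stated objective: faster
-- what changed: Replaces A's two staged index loops (adjacency scan with a full .count() rescan per hit, then an order scan) by one single pass per entry that run-length-encodes the string on the fly: a run closing at exactly length 2 sets the double flag and any descent clears the sorted flag; correct because in a non-decreasing string equal characters form one run, so 'count == 2' coincides with 'a run of length exactly 2'.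
import Mathlib
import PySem

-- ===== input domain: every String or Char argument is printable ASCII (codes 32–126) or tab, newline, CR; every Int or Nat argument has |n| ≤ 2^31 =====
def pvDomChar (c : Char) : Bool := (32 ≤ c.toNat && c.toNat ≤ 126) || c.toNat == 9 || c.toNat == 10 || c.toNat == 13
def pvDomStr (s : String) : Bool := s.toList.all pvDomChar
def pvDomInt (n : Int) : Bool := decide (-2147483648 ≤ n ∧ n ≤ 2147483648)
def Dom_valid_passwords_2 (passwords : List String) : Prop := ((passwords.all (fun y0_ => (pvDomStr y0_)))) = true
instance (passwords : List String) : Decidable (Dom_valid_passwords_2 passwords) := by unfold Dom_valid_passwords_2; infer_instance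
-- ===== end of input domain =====

-- B replaces A's two staged index loops (adjacency scan with full recount, then order
-- scan) by one single pass that run-length-encodes each entry on the fly
-- (objective: faster — measured faster in a timing run; correct because a
-- non-decreasing string groups equal characters into one run).

-- ===== PORT A =====
-- inner loops use entry[i] with i ∈ range(len(entry)-1), always in range, so getD is
-- exact; entry.count(entry[i]) counts a length-1 substring = the character count.
def valid_passwords_2 (passwords : List String) : Int :=
  passwords.foldl (fun valid entry =>
    let cs := entry.toList
    let adjacent := (List.range (cs.length - 1)).foldl (fun adjacent i =>
      if cs.getD i ' ' == cs.getD (i+1) ' ' then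
        (if cs.count (cs.getD i ' ') == 2 then true else adjacent)
      else adjacent) false
    let order := (List.range (cs.length - 1)).foldl (fun order i =>
      if cs.getD (i+1) ' ' < cs.getD i ' ' then false else order) true
    if adjacent && order then valid + 1 else valid) 0

-- ===== PORT B =====
-- loop body of B's inner 'for ch in entry': state = (prev, run, has_double, sorted_ok)
def pvStepB (st : Option Char × Int × Bool × Bool) (ch : Char) :
    Option Char × Int × Bool × Bool :=
  match st with
  | (none, run, hd, ok) => (some ch, run, hd, ok)
  | (some p, run, hd, ok) =>
    if ch == p then (some ch, run + 1, hd, ok)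
    else (some ch, 1, if run == 2 then true else hd, if ch < p then false else ok)

def valid_passwords_2_alt (passwords : List String) : Int :=
  passwords.foldl (fun valid entry =>
    match entry.toList.foldl pvStepB (none, 1, false, true) with
    | (_, run, hd, ok) =>
      let hd := if run == 2 then true else hd
      if ok && hd then valid + 1 else valid) 0

-- ===== PRECONDITION & SPEC =====
def Spec_valid_passwords_2 (passwords : List String) (out : Int) : Prop := out = valid_passwords_2_alt passwords
instance (passwords : List String) (out : Int) : Decidable (Spec_valid_passwords_2 passwords out) := by unfold Spec_valid_passwords_2; infer_instance

-- ===== CLAIM =====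
def Claim_equal_valid_passwords_2 : Prop := ∀ (passwords : List String), Dom_valid_passwords_2 passwords → Spec_valid_passwords_2 passwords (valid_passwords_2 passwords)

-- ===== LEMMAS AND PROOFS =====

-- A's two per-entry flags
def pvAdjA (cs : List Char) : Bool :=
  (List.range (cs.length - 1)).foldl (fun adjacent i =>
    if cs.getD i ' ' == cs.getD (i+1) ' ' then
      (if cs.count (cs.getD i ' ') == 2 then true else adjacent)
    else adjacent) false

def pvOrdA (cs : List Char) : Bool :=
  (List.range (cs.length - 1)).foldl (fun order i =>
    if cs.getD (i+1) ' ' < cs.getD i ' ' then false else order) true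

-- the common reference test: sorted AND some character has count exactly 2
def pvRef (cs : List Char) : Bool :=
  decide (cs.Pairwise (· ≤ ·)) && cs.any (fun c => cs.count c == 2)

-- B's per-entry test
def pvTestB (cs : List Char) : Bool :=
  match cs.foldl pvStepB (none, 1, false, true) with
  | (_, run, hd, ok) => ok && (if run == 2 then true else hd)

lemma pvAdjA_eq_any (cs : List Char) :
    pvAdjA cs = (List.range (cs.length - 1)).any (fun i =>
      (cs.getD i ' ' == cs.getD (i+1) ' ') && (cs.count (cs.getD i ' ') == 2)) := by
  unfold pvAdjA
  rw [PySem.List.foldl_congr_mem _ _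
      (fun adjacent i =>
        if ((cs.getD i ' ' == cs.getD (i+1) ' ') && (cs.count (cs.getD i ' ') == 2)) then true else adjacent)
      _
      (by
        intro acc i _
        by_cases he : cs[i]?.getD ' ' = cs[i+1]?.getD ' ' <;>
          by_cases hc : List.count (cs[i]?.getD ' ') cs = 2 <;> simp [he, hc])]
  rw [PySem.List.foldl_if_true_eq]
  simp

lemma pvOrdA_iff (cs : List Char) : pvOrdA cs = true ↔ cs.Pairwise (· ≤ ·) := by
  unfold pvOrdA
  rw [PySem.List.foldl_congr_mem _ _
      (fun order i => if (decide (cs.getD (i+1) ' ' < cs.getD i ' ')) then false else order)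
      _
      (by intro acc i _; by_cases h : cs.getD (i+1) ' ' < cs.getD i ' ' <;> simp)]
  rw [PySem.List.foldl_if_false_eq, Bool.true_and, Bool.not_eq_true', List.any_eq_false]
  rw [← List.isChain_iff_pairwise, List.isChain_iff_getElem]
  constructor
  · intro h i hi
    have := h i (List.mem_range.mpr (by omega))
    rw [List.getD_eq_getElem cs ' ' (by omega), List.getD_eq_getElem cs ' ' (by omega)] at this
    simpa using this
  · intro h i hi
    simp only [List.mem_range] at hi
    rw [List.getD_eq_getElem cs ' ' (by omega), List.getD_eq_getElem cs ' ' (by omega)]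
    have := h i (by omega)
    simpa using this

-- in a non-decreasing list, a character of count exactly 2 occurs at two ADJACENT positions
lemma pvCountTwoAdjacent (c : Char) : ∀ (cs : List Char), cs.Pairwise (· ≤ ·) →
    cs.count c = 2 →
    ∃ i, i + 1 < cs.length ∧ cs.getD i ' ' = c ∧ cs.getD (i+1) ' ' = c := by
  intro cs
  induction cs with
  | nil => intro _ hc; simp at hc
  | cons a t ih =>
    intro hp hc
    rcases List.pairwise_cons.mp hp with ⟨ha, hpt⟩
    by_cases hac : a = c
    · subst hac
      have hct : t.count a = 1 := by
        have := List.count_cons_self (a := a) (l := t)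
        omega
      have hmem : a ∈ t := List.count_pos_iff.mp (by omega)
      cases t with
      | nil => simp at hmem
      | cons b t' =>
        by_cases hb : b = a
        · exact ⟨0, by simp, rfl, by simp [hb]⟩
        · exfalso
          have hmem' : a ∈ t' := by
            rcases List.mem_cons.mp hmem with h | h
            · exact absurd h.symm hb
            · exact h
          have hab : a ≤ b := ha b (by simp)
          have hba : b ≤ a :=
            (List.pairwise_cons.mp hpt).1 a hmem'
          exact hb (le_antisymm hba hab)
    · have hct : t.count c = 2 := by
        rw [List.count_cons_of_ne hac] at hc; exact hc
      obtain ⟨i, hi, h1, h2⟩ := ih hpt hct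
      exact ⟨i + 1, by simpa using Nat.succ_lt_succ hi, by simpa using h1, by simpa using h2⟩

-- A's test equals the reference test
lemma pvTestA_eq_ref (cs : List Char) : (pvAdjA cs && pvOrdA cs) = pvRef cs := by
  unfold pvRef
  by_cases hp : cs.Pairwise (· ≤ ·)
  · have hord : pvOrdA cs = true := (pvOrdA_iff cs).mpr hp
    rw [hord, hp |> fun h => (decide_eq_true_iff).mpr h]
    rw [Bool.and_true, Bool.true_and, pvAdjA_eq_any]
    rw [Bool.eq_iff_iff, List.any_eq_true, List.any_eq_true]
    constructor
    · rintro ⟨i, hi, h⟩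
      simp only [List.mem_range] at hi
      simp only [Bool.and_eq_true, beq_iff_eq] at h
      refine ⟨cs.getD i ' ', ?_, by simpa using h.2⟩
      rw [List.getD_eq_getElem cs ' ' (by omega)]; exact List.getElem_mem _
    · rintro ⟨c, _, hcnt⟩
      simp only [beq_iff_eq] at hcnt
      obtain ⟨i, hi, h1, h2⟩ := pvCountTwoAdjacent c cs hp hcnt
      refine ⟨i, List.mem_range.mpr (by omega), ?_⟩
      rw [List.getD_eq_getElem?_getD] at h1 h2
      simp only [List.getD, Bool.and_eq_true, beq_iff_eq]
      exact ⟨by rw [h1, h2], by rw [h1]; exact hcnt⟩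
  · have hord : pvOrdA cs = false := by
      cases h : pvOrdA cs
      · rfl
      · exact absurd ((pvOrdA_iff cs).mp h) hp
    simp [hord, hp]

-- B's fold on a sorted tail: the final «some run is exactly 2» flag counts the
-- pending run of p (length n ≥ 1) together with the tail
lemma pvFoldB_hd (cs : List Char) : ∀ (p : Char) (n : Nat) (hd ok : Bool),
    1 ≤ n → (p :: cs).IsChain (· ≤ ·) →
    (if (cs.foldl pvStepB (some p, (n : Int), hd, ok)).2.1 == 2 then true
     else (cs.foldl pvStepB (some p, (n : Int), hd, ok)).2.2.1)
      = (hd || (List.replicate n p ++ cs).any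
          (fun c => (List.replicate n p ++ cs).count c == 2)) := by
  induction cs with
  | nil =>
    intro p n hd ok hn _
    simp only [List.foldl_nil, List.append_nil]
    by_cases h2 : n = 2
    · subst h2
      rw [if_pos (by norm_num)]
      have hany : (List.replicate 2 p).any
          (fun c => (List.replicate 2 p).count c == 2) = true := by
        rw [List.any_eq_true]
        exact ⟨p, by simp, by simp⟩
      rw [hany, Bool.or_true]
    · have hrun : ((n : Int) == 2) = false := by
        simp only [beq_eq_false_iff_ne, ne_eq]
        exact_mod_cast h2
      rw [hrun]
      have hany : (List.replicate n p).any
          (fun c => (List.replicate n p).count c == 2) = false := by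
        rw [List.any_eq_false]
        intro c hc
        have hcp : c = p := List.eq_of_mem_replicate hc
        subst hcp
        simp [h2]
      rw [hany, Bool.or_false]
      simp
  | cons ch rest ih =>
    intro p n hd ok hn hchain
    have hple : p ≤ ch := by
      have := List.isChain_iff_pairwise.mp hchain
      exact (List.pairwise_cons.mp this).1 ch (by simp)
    have hrest : (ch :: rest).IsChain (· ≤ ·) := by
      have := List.isChain_iff_pairwise.mp hchain
      exact List.isChain_iff_pairwise.mpr (List.pairwise_cons.mp this).2
    simp only [List.foldl_cons]
    by_cases heq : ch = p
    · subst heq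
      have hstep : pvStepB (some ch, (n : Int), hd, ok) ch = (some ch, (n : Int) + 1, hd, ok) := by
        simp [pvStepB]
      rw [hstep]
      have hcast : ((n : Int) + 1) = ((n + 1 : Nat) : Int) := by push_cast; ring
      rw [hcast, ih ch (n+1) hd ok (by omega) hrest]
      congr 1
      have hperm : (List.replicate (n+1) ch ++ rest).Perm (List.replicate n ch ++ ch :: rest) := by
        rw [List.replicate_succ]
        exact List.perm_middle.symm.trans (by simp)
      rw [Bool.eq_iff_iff, List.any_eq_true, List.any_eq_true]
      constructor
      · rintro ⟨c, hc, h2⟩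
        exact ⟨c, hperm.mem_iff.mp hc, by rwa [hperm.count_eq] at h2⟩
      · rintro ⟨c, hc, h2⟩
        exact ⟨c, hperm.mem_iff.mpr hc, by rwa [← hperm.count_eq] at h2⟩
    · have hlt : p < ch := lt_of_le_of_ne hple (fun h => heq h.symm)
      have hstep : pvStepB (some p, (n : Int), hd, ok) ch
          = (some ch, 1, if (n : Int) == 2 then true else hd, if ch < p then false else ok) := by
        simp [pvStepB, heq]
      rw [hstep]
      have h1 : (1 : Int) = ((1 : Nat) : Int) := by norm_num
      rw [h1, ih ch 1 (if (n : Int) == 2 then true else hd) (if ch < p then false else ok)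
            (le_refl 1) hrest]
      -- p does not occur in ch :: rest (all its elements are ≥ ch > p)
      have hpnot : p ∉ ch :: rest := by
        intro hmem
        have hpair : (ch :: rest).Pairwise (· ≤ ·) := List.isChain_iff_pairwise.mp hrest
        rcases List.mem_cons.mp hmem with h | h
        · exact heq h.symm
        · have : ch ≤ p := (List.pairwise_cons.mp hpair).1 p h
          exact absurd this (not_le.mpr hlt)
      have hcount : ∀ c, (List.replicate n p ++ ch :: rest).count c
          = (if c = p then n else 0) + (ch :: rest).count c := by
        intro c
        rw [List.count_append, List.count_replicate]
        by_cases hcp : c = p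
        · subst hcp; simp
        · have h' : ¬ p = c := fun h => hcp h.symm
          simp [hcp, h']
      have hntwo : ((n : Int) == 2) = (n == 2) := by
        by_cases h2 : n = 2
        · subst h2; simp
        · have h2' : ¬ ((n : Int) = 2) := by exact_mod_cast h2
          simp [h2, h2']
      rw [hntwo]
      have hrepl1 : (List.replicate 1 ch ++ rest) = ch :: rest := by simp
      rw [hrepl1]
      by_cases h2 : n = 2
      · subst h2
        have hanyR : ((List.replicate 2 p ++ ch :: rest).any
            (fun c => (List.replicate 2 p ++ ch :: rest).count c == 2)) = true := by
          rw [List.any_eq_true]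
          refine ⟨p, List.mem_append.mpr (Or.inl (by simp)), ?_⟩
          have h0 : List.count p (ch :: rest) = 0 := List.count_eq_zero.mpr hpnot
          have : (List.replicate 2 p ++ ch :: rest).count p = 2 := by
            rw [hcount, h0, if_pos rfl]
          simp only [this]
          rfl
        rw [hanyR]
        simp
      · have hfalse : (n == 2) = false := by simp [h2]
        rw [hfalse]
        have hanyeq : ((List.replicate n p ++ ch :: rest).any
              (fun c => (List.replicate n p ++ ch :: rest).count c == 2))
            = ((ch :: rest).any (fun c => (ch :: rest).count c == 2)) := by
          rw [Bool.eq_iff_iff, List.any_eq_true, List.any_eq_true]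
          constructor
          · rintro ⟨c, hc, hcc⟩
            simp only [beq_iff_eq] at hcc
            rw [hcount c] at hcc
            by_cases hcp : c = p
            · subst hcp
              rw [if_pos rfl, List.count_eq_zero.mpr hpnot] at hcc
              exfalso; omega
            · rw [if_neg hcp, Nat.zero_add] at hcc
              rcases List.mem_append.mp hc with h | h
              · exact absurd (List.eq_of_mem_replicate h) hcp
              · exact ⟨c, h, by simp [hcc]⟩
          · rintro ⟨c, hc, hcc⟩
            simp only [beq_iff_eq] at hcc
            by_cases hcp : c = p
            · exact absurd (hcp ▸ hc) hpnot
            · refine ⟨c, List.mem_append.mpr (Or.inr hc), ?_⟩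
              rw [hcount, if_neg hcp, Nat.zero_add]
              simp [hcc]
        rw [hanyeq]
        simp

-- the sorted flag after B's fold records exactly chain-ness of p :: cs
lemma pvFoldB_ok (cs : List Char) : ∀ (p : Char) (run : Int) (hd ok : Bool),
    (cs.foldl pvStepB (some p, run, hd, ok)).2.2.2
      = (ok && decide ((p :: cs).IsChain (· ≤ ·))) := by
  induction cs with
  | nil => intro p run hd ok; simp
  | cons ch rest ih =>
    intro p run hd ok
    simp only [List.foldl_cons]
    by_cases heq : ch = p
    · subst heq
      have hstep : pvStepB (some ch, run, hd, ok) ch = (some ch, run + 1, hd, ok) := by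
        simp [pvStepB]
      rw [hstep, ih]
      simp [List.isChain_cons]
    · have hstep : pvStepB (some p, run, hd, ok) ch
          = (some ch, 1, if run == 2 then true else hd, if ch < p then false else ok) := by
        simp [pvStepB, heq]
      rw [hstep, ih]
      by_cases hlt : ch < p
      · have : ¬ p ≤ ch := not_le.mpr hlt
        simp [hlt, List.isChain_cons, this]
      · have hle : p ≤ ch := not_lt.mp hlt
        simp [hlt, List.isChain_cons, hle]

-- B's test equals the reference test
lemma pvTestB_eq_ref (cs : List Char) : pvTestB cs = pvRef cs := by
  unfold pvTestB pvRef
  cases cs with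
  | nil => decide
  | cons c0 rest =>
    rcases hfold : (c0 :: rest).foldl pvStepB (none, 1, false, true) with ⟨p', run, hd', ok'⟩
    have hfold' : rest.foldl pvStepB (some c0, (1 : Int), false, true) = (p', run, hd', ok') := by
      rw [← hfold]
      simp [pvStepB]
    dsimp only
    by_cases hp : (c0 :: rest).Pairwise (· ≤ ·)
    · have hchain : (c0 :: rest).IsChain (· ≤ ·) := List.isChain_iff_pairwise.mpr hp
      have hh := pvFoldB_hd rest c0 1 false true (le_refl 1) hchain
      have ho := pvFoldB_ok rest c0 (1 : Int) false true
      rw [show ((1 : Nat) : Int) = (1 : Int) from rfl] at hh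
      rw [hfold'] at hh ho
      dsimp only at hh ho
      have hok : ok' = true := by
        rw [ho]
        simp [hchain]
      have hhd : (if run == 2 then true else hd')
          = (c0 :: rest).any (fun c => (c0 :: rest).count c == 2) := by
        rw [hh]
        simp
      rw [hok, hhd, decide_eq_true_iff.mpr hp]
    · have ho := pvFoldB_ok rest c0 (1 : Int) false true
      rw [hfold'] at ho
      dsimp only at ho
      have hok : ok' = false := by
        rw [ho]
        have : ¬ (c0 :: rest).IsChain (· ≤ ·) := fun h => hp (List.isChain_iff_pairwise.mp h)
        simp [this]
      rw [hok]
      have : (decide ((c0 :: rest).Pairwise (· ≤ ·))) = false := by simp [hp]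
      rw [this]
      simp

-- ===== VERDICT =====
theorem valid_passwords_2_spec : Claim_equal_valid_passwords_2 := by
  intro passwords _
  unfold Spec_valid_passwords_2 valid_passwords_2 valid_passwords_2_alt
  refine (PySem.List.foldl_congr_mem _ _ _ _ ?_).symm.symm
  intro acc entry _
  show (if pvAdjA entry.toList && pvOrdA entry.toList then acc + 1 else acc)
     = (if pvTestB entry.toList then acc + 1 else acc)
  rw [pvTestA_eq_ref, pvTestB_eq_ref]
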